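-- pv_equiv track=rewrite | github.com/cherri135/Calculator | CalcFunc.py | RemoveDoubleOperators
-- ===== SOURCE A (Python) =====
-- import operator
--
-- operators = {
--     "+":operator.add,
--     "-":operator.sub,
--     "*":operator.mul,
--     "/":operator.truediv
-- }
--
-- def CheckIfOperator(Char):
--     for operator in operators:
--         if Char == operator:
--             return True
--
-- def RemoveDoubleOperators(ProblemToCalculate):
--
--     clean = ""
--
--     LastWasOper = False
--
--     for Char in ProblemToCalculate:
--         if CheckIfOperator(Char):
--             if LastWasOper:
--                 continue
--             else:
--                 LastWasOper = True
--                 clean += Char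
--         else:
--             LastWasOper = False
--             clean += Char
--
--     return clean
-- ===== SOURCE B (Python) =====
-- import re
--
-- def RemoveDoubleOperators(ProblemToCalculate):
--     # Regex substitution: each maximal run of operator characters is replaced
--     # by its first character; everything else is left untouched.
--     return re.sub(r'[+*/-]+', lambda m: m.group(0)[0], ProblemToCalculate)
-- ===== Notes on version B (the rewrite author's own statement) =====
-- stated objective: idiomatic
-- what changed: Replaces A's per-character loop with a LastWasOper flag (and a scan over the operator dict per char) by a single regex substitution re.sub(r'[+*/-]+', ...) that replaces each maximal run of operator characters by its first character.
import Mathlib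
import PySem

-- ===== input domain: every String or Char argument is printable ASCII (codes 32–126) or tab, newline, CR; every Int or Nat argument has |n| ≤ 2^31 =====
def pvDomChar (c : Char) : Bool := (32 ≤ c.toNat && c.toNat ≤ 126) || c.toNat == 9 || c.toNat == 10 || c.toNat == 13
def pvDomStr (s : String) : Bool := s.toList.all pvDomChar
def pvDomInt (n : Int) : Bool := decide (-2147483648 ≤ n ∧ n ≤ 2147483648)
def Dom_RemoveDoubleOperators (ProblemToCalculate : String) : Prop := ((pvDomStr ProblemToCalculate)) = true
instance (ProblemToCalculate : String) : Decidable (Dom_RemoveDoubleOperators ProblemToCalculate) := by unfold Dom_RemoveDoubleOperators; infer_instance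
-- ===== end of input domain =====

-- B replaces A's LastWasOper state machine by a regex substitution replacing each maximal operator run by its first character; idiomatic, same O(n) cost.


-- ===== PORT A =====
-- CheckIfOperator: scans the operator dict's keys, returns True on a match (None, i.e. falsy, otherwise)
def checkIfOperator (c : Char) : Bool :=
  c == '+' || c == '-' || c == '*' || c == '/'

def RemoveDoubleOperators (ProblemToCalculate : String) : String :=
  (ProblemToCalculate.toList.foldl
    (fun (st : String × Bool) c =>
      if checkIfOperator c then
        if st.2 then st else (st.1.push c, true)
      else
        (st.1.push c, false))
    ("", false)).1

-- ===== PORT B =====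
-- the regex character class [+*/-], in the pattern's order
def inOpClass (c : Char) : Bool := ("+*/-".toList).contains c

-- hand port of re.sub(r'[+*/-]+', λ m, m.group(0)[0], s) (exact: the pattern is a
-- plain character-class repetition, so its matches are precisely the maximal runs
-- of class characters): scan left to right; at a position where the pattern
-- matches, emit the match's first character and resume after the whole matched
-- run; at a non-matching position copy the character literally.
def regexSubRuns (l : List Char) : List Char :=
  match l with
  | [] => []
  | c :: rest =>
    if inOpClass c then c :: regexSubRuns (rest.dropWhile inOpClass)
    else c :: regexSubRuns rest
termination_by l.length
decreasing_by
  · exact Nat.lt_succ_of_le (List.length_dropWhile_le _ _)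
  · simp

def RemoveDoubleOperators_alt (ProblemToCalculate : String) : String :=
  String.ofList (regexSubRuns ProblemToCalculate.toList)

-- ===== PRECONDITION & SPEC =====
def Spec_RemoveDoubleOperators (ProblemToCalculate : String) (out : String) : Prop := out = RemoveDoubleOperators_alt ProblemToCalculate
instance (ProblemToCalculate : String) (out : String) : Decidable (Spec_RemoveDoubleOperators ProblemToCalculate out) := by unfold Spec_RemoveDoubleOperators; infer_instance

-- ===== CLAIM (what is proved, stated in full; the proofs are below) =====
def Claim_equal_RemoveDoubleOperators : Prop := ∀ (ProblemToCalculate : String), Dom_RemoveDoubleOperators ProblemToCalculate → Spec_RemoveDoubleOperators ProblemToCalculate (RemoveDoubleOperators ProblemToCalculate)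

-- ===== LEMMAS AND PROOFS =====

-- B's character class tests the same characters as A's CheckIfOperator
theorem opfun_eq : inOpClass = checkIfOperator := by
  funext c
  have hl : ("+*/-".toList) = ['+', '*', '/', '-'] := by decide
  simp only [inOpClass, checkIfOperator, hl, List.contains]
  cases h1 : (c == '+') <;> cases h2 : (c == '*') <;> cases h3 : (c == '/') <;>
    cases h4 : (c == '-') <;> simp [h1, h2, h3, h4, List.elem]

theorem push_append_ofList (s : String) (c : Char) (l : List Char) :
    s.push c ++ String.ofList l = s ++ String.ofList (c :: l) := by
  apply String.ext; simp

theorem regexSubRuns_loop (l : List Char) :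
    ∀ (s : String) (flag : Bool),
    (l.foldl
      (fun (st : String × Bool) c =>
        if checkIfOperator c then
          if st.2 then st else (st.1.push c, true)
        else
          (st.1.push c, false))
      (s, flag)).1
    = s ++ String.ofList (if flag then regexSubRuns (l.dropWhile inOpClass) else regexSubRuns l) := by
  induction l with
  | nil =>
    intro s flag
    cases flag <;> simp [regexSubRuns]
  | cons c rest ih =>
    intro s flag
    by_cases h : checkIfOperator c = true
    · have hB : inOpClass c = true := by rw [opfun_eq]; exact h
      cases flag with
      | true =>
        simp only [List.foldl_cons, h, if_true, List.dropWhile_cons_of_pos hB]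
        exact ih s true
      | false =>
        simp only [List.foldl_cons, h, if_true, Bool.false_eq_true, if_false]
        rw [ih (s.push c) true, regexSubRuns, if_pos hB, push_append_ofList]
        simp
    · have hB : ¬ (inOpClass c = true) := by rw [opfun_eq]; exact h
      cases flag with
      | true =>
        simp only [List.foldl_cons, h, Bool.false_eq_true, if_false, List.dropWhile_cons_of_neg hB]
        rw [ih (s.push c) false, regexSubRuns, if_neg hB, push_append_ofList]
        simp
      | false =>
        simp only [List.foldl_cons, h, Bool.false_eq_true, if_false]
        rw [ih (s.push c) false, regexSubRuns, if_neg hB, push_append_ofList]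
        simp

-- ===== VERDICT (by name: the statement is the Claim_ definition above) =====
theorem RemoveDoubleOperators_spec : Claim_equal_RemoveDoubleOperators := by
  intro s _
  unfold Spec_RemoveDoubleOperators RemoveDoubleOperators RemoveDoubleOperators_alt
  rw [regexSubRuns_loop s.toList "" false]
  simp only [Bool.false_eq_true, if_false]
  apply String.ext; simp
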